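-- pv_equiv track=rewrite | github.com/ohanacode-dev/OhanaCode-IOT | mm_control/tcp_api.py | cleanup_string
-- ===== SOURCE A (Python) =====
-- def cleanup_string(msg):
--     esc_seq = [['%20', ' '], ['%9E', 'ž'], ['%8E', 'Ž'], ['%9A', 'š'], ['%8A', 'Š'], ['%26%23269%3B', 'č'],
--                ['%26%23268%3B', 'Č'], ['%26%23263%3B', 'ć'], ['%26%23273%3B', 'đ'], ['%26%23272%3B', 'Đ'],
--                ['%26%23262%3B', 'Ć'], ['%27', "'"], ['%22', '"']]
--
--     for c in esc_seq:
--         while c[0] in msg: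
--             msg = msg.replace(c[0], c[1])
--
--     return msg
-- ===== SOURCE B (Python) =====
-- def cleanup_string(msg):
--     # One forward pass: at each index try the escape table (12-char forms first),
--     # emit the decoded char and jump over the sequence, else copy one char.
--     table = [('%26%23269%3B', 'č'), ('%26%23268%3B', 'Č'), ('%26%23263%3B', 'ć'),
--              ('%26%23273%3B', 'đ'), ('%26%23272%3B', 'Đ'), ('%26%23262%3B', 'Ć'),
--              ('%20', ' '), ('%9E', 'ž'), ('%8E', 'Ž'), ('%9A', 'š'), ('%8A', 'Š'),
--              ('%27', "'"), ('%22', '"')]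
--     out = []
--     i = 0
--     n = len(msg)
--     while i < n:
--         for seq, ch in table:
--             if msg.startswith(seq, i):
--                 out.append(ch)
--                 i += len(seq)
--                 break
--         else:
--             out.append(msg[i])
--             i += 1
--     return ''.join(out)
-- ===== Notes on version B (the rewrite author's own statement) =====
-- stated objective: alternative
-- what changed: A runs thirteen sequential whole-string replace passes (each inside a re-scanning while loop); B makes one left-to-right scan that at each position matches an escape sequence from a table (longest forms first) and emits the decoded character, never re-scanning emitted text.
import Mathlib
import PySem

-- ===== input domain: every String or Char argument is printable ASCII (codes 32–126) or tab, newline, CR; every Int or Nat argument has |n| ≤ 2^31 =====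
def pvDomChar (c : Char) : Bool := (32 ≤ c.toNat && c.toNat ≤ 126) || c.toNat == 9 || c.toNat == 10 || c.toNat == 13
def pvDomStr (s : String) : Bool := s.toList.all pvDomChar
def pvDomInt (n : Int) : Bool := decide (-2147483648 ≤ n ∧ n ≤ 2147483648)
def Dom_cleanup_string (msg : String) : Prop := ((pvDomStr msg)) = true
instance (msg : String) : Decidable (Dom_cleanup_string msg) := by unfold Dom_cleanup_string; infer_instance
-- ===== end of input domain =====

-- B replaces A's thirteen repeated whole-string replace passes by one left-to-right scan
-- that decodes each escape sequence in place (objective: alternative single-pass algorithm).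

-- ===== PORT A =====
-- Support lemmas needed by port A's `while c[0] in msg` loop for termination:
-- `replace` strictly shrinks the string when the (longer) pattern occurs in it.

theorem pvGo_zero (old new l acc : List Char) :
    PySem.Chars.replace.go old new 0 l acc = acc.reverse ++ l := by
  rw [PySem.Chars.replace.go.eq_def]

theorem pvGo_succ_nil (old new : List Char) (f : Nat) (acc : List Char) :
    PySem.Chars.replace.go old new (f+1) [] acc = acc.reverse := by
  rw [PySem.Chars.replace.go.eq_def]

theorem pvGo_succ_cons (old new : List Char) (f : Nat) (c : Char) (t acc : List Char) :
    PySem.Chars.replace.go old new (f+1) (c :: t) acc =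
      if old.isPrefixOf (c :: t) then
        PySem.Chars.replace.go old new f (List.drop old.length (c :: t)) (new.reverse ++ acc)
      else PySem.Chars.replace.go old new f t (c :: acc) := by
  rw [PySem.Chars.replace.go.eq_def]

theorem pvGo_acc (old new : List Char) :
    ∀ (f : Nat) (l acc : List Char),
      PySem.Chars.replace.go old new f l acc = acc.reverse ++ PySem.Chars.replace.go old new f l [] := by
  intro f
  induction f with
  | zero => intro l acc; rw [pvGo_zero, pvGo_zero]; simp
  | succ f ih =>
    intro l acc
    cases l with
    | nil => rw [pvGo_succ_nil, pvGo_succ_nil]; simp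
    | cons c t =>
      rw [pvGo_succ_cons, pvGo_succ_cons]
      by_cases h : old.isPrefixOf (c :: t)
      · simp only [h, if_true]
        rw [ih _ (new.reverse ++ acc), ih _ (new.reverse ++ [])]
        simp
      · simp only [h, Bool.false_eq_true, if_false]
        rw [ih t (c :: acc), ih t [c]]
        simp

theorem pvGo_fuel (old new : List Char) (hold : old ≠ []) :
    ∀ (f₁ f₂ : Nat) (l acc : List Char), l.length ≤ f₁ → l.length ≤ f₂ →
      PySem.Chars.replace.go old new f₁ l acc = PySem.Chars.replace.go old new f₂ l acc := by
  intro f₁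
  induction f₁ with
  | zero =>
    intro f₂ l acc h1 _
    have : l = [] := by cases l <;> simp_all
    subst this
    cases f₂
    · rfl
    · rw [pvGo_zero, pvGo_succ_nil]; simp
  | succ f ih =>
    intro f₂ l acc h1 h2
    cases l with
    | nil =>
      cases f₂
      · rw [pvGo_zero, pvGo_succ_nil]; simp
      · rw [pvGo_succ_nil, pvGo_succ_nil]
    | cons c t =>
      cases f₂ with
      | zero => simp at h2
      | succ f₂ =>
        rw [pvGo_succ_cons, pvGo_succ_cons]
        by_cases h : old.isPrefixOf (c :: t)
        · simp only [h, if_true]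
          have hlen : 1 ≤ old.length := by cases old <;> simp_all
          apply ih
          · simp at h1 ⊢; omega
          · simp at h2 ⊢; omega
        · simp only [h, Bool.false_eq_true, if_false]
          apply ih
          · simp at h1 ⊢; omega
          · simp at h2 ⊢; omega

theorem pvRepl_nil (old new : List Char) (hold : old ≠ []) :
    PySem.Chars.replace [] old new = [] := by
  rw [PySem.Chars.replace]
  have : old.isEmpty = false := by cases old <;> simp_all
  rw [this]
  simp [pvGo_zero]

theorem pvRepl_cons_neg (old new : List Char) (c : Char) (t : List Char)
    (hold : old ≠ []) (h : ¬ old <+: (c :: t)) :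
    PySem.Chars.replace (c :: t) old new = c :: PySem.Chars.replace t old new := by
  have hE : old.isEmpty = false := by cases old <;> simp_all
  rw [PySem.Chars.replace, PySem.Chars.replace, hE]
  simp only [Bool.false_eq_true, if_false]
  have hpf : old.isPrefixOf (c :: t) = false := by
    by_contra hx
    exact h (List.isPrefixOf_iff_prefix.mp (by simpa using hx))
  rw [show (c :: t).length = t.length + 1 by simp, pvGo_succ_cons, hpf]
  simp only [Bool.false_eq_true, if_false]
  rw [pvGo_acc]
  simp

theorem pvRepl_cons_pos (old new t : List Char) (hold : old ≠ []) :
    PySem.Chars.replace (old ++ t) old new = new ++ PySem.Chars.replace t old new := by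
  have hE : old.isEmpty = false := by cases old <;> simp_all
  rw [PySem.Chars.replace, PySem.Chars.replace, hE]
  simp only [Bool.false_eq_true, if_false]
  cases old with
  | nil => exact absurd rfl hold
  | cons o o' =>
    have hpf : (o :: o').isPrefixOf ((o :: o') ++ t) = true :=
      List.isPrefixOf_iff_prefix.mpr (List.prefix_append _ _)
    rw [show ((o :: o') ++ t).length = (o' ++ t).length + 1 by simp]
    rw [show (o :: o') ++ t = o :: (o' ++ t) by simp] at hpf ⊢
    rw [pvGo_succ_cons, hpf]
    simp only [if_true]
    rw [show List.drop ((o :: o').length) (o :: (o' ++ t)) = t by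
      simp [List.drop_append_of_le_length]]
    rw [pvGo_fuel (o :: o') new (by simp) ((o' ++ t).length) t.length t _ (by simp) (by simp)]
    rw [pvGo_acc]
    simp

theorem pvRepl_len_le (old new : List Char) (hold : old ≠ []) (hlen : new.length ≤ old.length) :
    ∀ n (s : List Char), s.length ≤ n → (PySem.Chars.replace s old new).length ≤ s.length := by
  intro n
  induction n with
  | zero =>
    intro s hs
    have : s = [] := by cases s <;> simp_all
    subst this; rw [pvRepl_nil old new hold]
  | succ n ih =>
    intro s hs
    by_cases h : old <+: s
    · obtain ⟨t, rfl⟩ := h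
      rw [pvRepl_cons_pos old new t hold]
      have h1 : 1 ≤ old.length := by cases old <;> simp_all
      have := ih t (by simp at hs; omega)
      simp at *; omega
    · cases s with
      | nil => rw [pvRepl_nil old new hold]
      | cons c t =>
        rw [pvRepl_cons_neg old new c t hold h]
        have := ih t (by simp at hs; omega)
        simp at *; omega

theorem pvRepl_len_lt (old new : List Char) (hold : old ≠ []) (hlen : new.length < old.length) :
    ∀ n (s : List Char), s.length ≤ n → old <:+: s →
      (PySem.Chars.replace s old new).length < s.length := by
  intro n
  induction n with
  | zero =>
    intro s hs hin
    have : s = [] := by cases s <;> simp_all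
    subst this
    simp at hin
    exact absurd hin hold
  | succ n ih =>
    intro s hs hin
    by_cases h : old <+: s
    · obtain ⟨t, rfl⟩ := h
      rw [pvRepl_cons_pos old new t hold]
      have := pvRepl_len_le old new hold (le_of_lt hlen) t.length t le_rfl
      simp at *; omega
    · cases s with
      | nil =>
        simp at hin
        exact absurd hin hold
      | cons c t =>
        rw [pvRepl_cons_neg old new c t hold h]
        have ht : old <:+: t := by
          rcases List.infix_cons_iff.mp hin with h1 | h1
          · exact absurd h1 h
          · exact h1
        have := ih t (by simp at hs; omega) ht
        simp at *; omega

-- A's escape table, in A's order (each replacement is the 1-character string of the list)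
def pvEscA : List (List Char × List Char) :=
  [(['%','2','0'], [' ']),
   (['%','9','E'], ['ž']),
   (['%','8','E'], ['Ž']),
   (['%','9','A'], ['š']),
   (['%','8','A'], ['Š']),
   (['%','2','6','%','2','3','2','6','9','%','3','B'], ['č']),
   (['%','2','6','%','2','3','2','6','8','%','3','B'], ['Č']),
   (['%','2','6','%','2','3','2','6','3','%','3','B'], ['ć']),
   (['%','2','6','%','2','3','2','7','3','%','3','B'], ['đ']),
   (['%','2','6','%','2','3','2','7','2','%','3','B'], ['Đ']),
   (['%','2','6','%','2','3','2','6','2','%','3','B'], ['Ć']),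
   (['%','2','7'], ['\'']),
   (['%','2','2'], ['"'])]

-- `while c[0] in msg: msg = msg.replace(c[0], c[1])` (the length guard only makes it total;
-- it holds for every entry of pvEscA)
def pvWhileLoop (p r s : List Char) : List Char :=
  if h : PySem.Chars.isIn p s = true ∧ r.length < p.length then
    pvWhileLoop p r (PySem.Chars.replace s p r)
  else s
termination_by s.length
decreasing_by
  have hne : p ≠ [] := by cases p <;> simp_all
  exact pvRepl_len_lt p r hne h.2 s.length s le_rfl ((PySem.Chars.isIn_iff_infix p s).mp h.1)

def cleanup_string (msg : String) : String :=
  String.mk (pvEscA.foldl (fun m c => pvWhileLoop c.1 c.2 m) msg.toList)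

-- ===== PORT B =====
-- B's table: the 12-character escape forms first, then the 3-character ones (as in Source B)
def pvEscB : List (List Char × List Char) :=
  [(['%','2','6','%','2','3','2','6','9','%','3','B'], ['č']),
   (['%','2','6','%','2','3','2','6','8','%','3','B'], ['Č']),
   (['%','2','6','%','2','3','2','6','3','%','3','B'], ['ć']),
   (['%','2','6','%','2','3','2','7','3','%','3','B'], ['đ']),
   (['%','2','6','%','2','3','2','7','2','%','3','B'], ['Đ']),
   (['%','2','6','%','2','3','2','6','2','%','3','B'], ['Ć']),
   (['%','2','0'], [' ']),
   (['%','9','E'], ['ž']),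
   (['%','8','E'], ['Ž']),
   (['%','9','A'], ['š']),
   (['%','8','A'], ['Š']),
   (['%','2','7'], ['\'']),
   (['%','2','2'], ['"'])]

theorem pvEscB_fst_len : ∀ pr ∈ pvEscB, 1 ≤ pr.1.length := by decide

-- Source B's single forward scan: decode an escape at the cursor, or copy one character
def pvDecode : List Char → List Char
  | [] => []
  | c :: t =>
    match h : pvEscB.find? (fun pr => pr.1.isPrefixOf (c :: t)) with
    | some pr => pr.2 ++ pvDecode ((c :: t).drop pr.1.length)
    | none => c :: pvDecode t
termination_by cs => cs.length
decreasing_by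
  · have h1 := pvEscB_fst_len _ (List.mem_of_find?_eq_some h)
    simp [List.length_drop]; omega
  · simp

def cleanup_string_alt (msg : String) : String :=
  String.mk (pvDecode msg.toList)

-- ===== PRECONDITION & SPEC =====
def Spec_cleanup_string (msg : String) (out : String) : Prop := out = cleanup_string_alt msg
instance (msg : String) (out : String) : Decidable (Spec_cleanup_string msg out) := by unfold Spec_cleanup_string; infer_instance

-- ===== CLAIM (what is proved, stated in full; the proofs are below) =====
def Claim_equal_cleanup_string : Prop := ∀ (msg : String), Dom_cleanup_string msg → Spec_cleanup_string msg (cleanup_string msg)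

-- ===== LEMMAS AND PROOFS =====

theorem pvRepl_not_infix (old new : List Char) (hold : old ≠ []) :
    ∀ s, ¬ old <:+: s → PySem.Chars.replace s old new = s := by
  intro s
  induction s with
  | nil => intro _; exact pvRepl_nil old new hold
  | cons c t ih =>
    intro h
    have hp : ¬ old <+: (c :: t) := fun hx => h hx.isInfix
    have ht : ¬ old <:+: t := fun hx => h (List.infix_cons_iff.mpr (Or.inr hx))
    rw [pvRepl_cons_neg old new c t hold hp, ih ht]


-- the characters that occur in any escape sequence
def pvIsPatChar (ch : Char) : Bool :=
  ch = '%' || ch = '0' || ch = '2' || ch = '3' || ch = '6' || ch = '7' || ch = '8' ||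
  ch = '9' || ch = 'A' || ch = 'B' || ch = 'E'

-- basic facts about the table, established by computation
theorem pvEscA_facts : ∀ pr ∈ pvEscA,
    2 ≤ pr.1.length ∧ pr.1.all pvIsPatChar = true ∧ pr.2.length = 1 ∧
    pr.2.all (fun ch => !pvIsPatChar ch) = true := by decide

theorem pvEscA_head : ∀ pr ∈ pvEscA, pr.1.headD ' ' = '%' := by decide

theorem pvPerm : pvEscB.Perm pvEscA := by decide

theorem pvNodupFst : (pvEscA.map Prod.fst).Nodup := by decide

-- no escape sequence starts strictly inside another one (or inside itself at j > 0)
theorem pvIncomp : ∀ p ∈ pvEscA, ∀ q ∈ pvEscA, ∀ j < p.1.length,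
    (j = 0 → q.1 ≠ p.1) → ¬ q.1 <+: p.1.drop j ∧ ¬ p.1.drop j <+: q.1 := by decide

theorem pvNoOccInside (p q : List Char × List Char) (hp : p ∈ pvEscA) (hq : q ∈ pvEscA)
    (x : List Char) (j : Nat) (hj : j < p.1.length) (hne : j = 0 → q.1 ≠ p.1) :
    ¬ q.1 <+: (p.1.drop j ++ x) := by
  intro hpre
  have h2 : p.1.drop j <+: (p.1.drop j ++ x) := List.prefix_append _ _
  rcases List.prefix_or_prefix_of_prefix hpre h2 with h | h
  · exact (pvIncomp p hp q hq j hj hne).1 h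
  · exact (pvIncomp p hp q hq j hj hne).2 h

-- replace skips over a region free of occurrences of the pattern
theorem pvRepl_skip (q new : List Char) (hq : q ≠ []) :
    ∀ (pre x : List Char), (∀ j < pre.length, ¬ q <+: (pre.drop j ++ x)) →
      PySem.Chars.replace (pre ++ x) q new = pre ++ PySem.Chars.replace x q new := by
  intro pre
  induction pre with
  | nil => intro x _; simp
  | cons c pre' ih =>
    intro x h
    have h0 : ¬ q <+: (c :: (pre' ++ x)) := by
      have := h 0 (by simp)
      simpa using this
    rw [show (c :: pre') ++ x = c :: (pre' ++ x) by simp,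
        pvRepl_cons_neg q new c (pre' ++ x) hq h0]
    rw [ih x (fun j hj => by have := h (j + 1) (by simp; omega); simpa using this)]
    simp

-- a nonempty pattern-letter word that is a prefix of the replaced string was a prefix before
theorem pvPrefix_repl (q : List Char) (rc : Char) (hq : q ≠ [])
    (hrc : pvIsPatChar rc = false) :
    ∀ n (u : List Char), u.length ≤ n → ∀ (w : List Char), w ≠ [] →
      w.all pvIsPatChar = true → w <+: PySem.Chars.replace u q [rc] → w <+: u := by
  intro n
  induction n with
  | zero =>
    intro u hu w hw _ hpre
    have : u = [] := by cases u <;> simp_all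
    subst this
    rw [pvRepl_nil q [rc] hq] at hpre
    exact absurd (List.prefix_nil.mp hpre) hw
  | succ n ih =>
    intro u hu w hw hwall hpre
    by_cases h : q <+: u
    · obtain ⟨t, rfl⟩ := h
      rw [pvRepl_cons_pos q [rc] t hq] at hpre
      cases w with
      | nil => exact absurd rfl hw
      | cons wc w' =>
        have : wc = rc := (List.cons_prefix_cons.mp hpre).1
        subst this
        simp [hrc] at hwall
    · cases u with
      | nil =>
        rw [pvRepl_nil q [rc] hq] at hpre
        exact absurd (List.prefix_nil.mp hpre) hw
      | cons c t =>
        rw [pvRepl_cons_neg q [rc] c t hq h] at hpre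
        cases w with
        | nil => exact absurd rfl hw
        | cons wc w' =>
          obtain ⟨hwc, hw'⟩ := List.cons_prefix_cons.mp hpre
          subst hwc
          by_cases hw'e : w' = []
          · subst hw'e
            exact List.cons_prefix_cons.mpr ⟨rfl, List.nil_prefix⟩
          · have : w' <+: t := by
              apply ih t (by simp at hu; omega) w' hw'e
                (by simp at hwall; simpa using hwall.2)
              exact hw'
            exact List.cons_prefix_cons.mpr ⟨rfl, this⟩

-- the pattern does not occur in the replaced string at all (Python's while runs once)
theorem pvNot_infix_repl (q : List Char) (rc : Char) (hq2 : 2 ≤ q.length)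
    (hqall : q.all pvIsPatChar = true) (hrc : pvIsPatChar rc = false) :
    ∀ n (u : List Char), u.length ≤ n → ¬ q <:+: PySem.Chars.replace u q [rc] := by
  have hq : q ≠ [] := by cases q <;> simp_all
  intro n
  induction n with
  | zero =>
    intro u hu hin
    have : u = [] := by cases u <;> simp_all
    subst this
    rw [pvRepl_nil q [rc] hq] at hin
    simp at hin
    exact hq hin
  | succ n ih =>
    intro u hu hin
    by_cases h : q <+: u
    · obtain ⟨t, rfl⟩ := h
      rw [pvRepl_cons_pos q [rc] t hq] at hin
      simp only [List.singleton_append] at hin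
      rcases List.infix_cons_iff.mp hin with h1 | h1
      · cases q with
        | nil => exact hq rfl
        | cons qc q' =>
          have : qc = rc := (List.cons_prefix_cons.mp h1).1
          subst this
          simp [hrc] at hqall
      · refine ih t ?_ h1
        have h3 : 1 ≤ q.length := by omega
        simp at hu; omega
    · cases u with
      | nil =>
        rw [pvRepl_nil q [rc] hq] at hin
        simp at hin
        exact hq hin
      | cons c t =>
        rw [pvRepl_cons_neg q [rc] c t hq h] at hin
        rcases List.infix_cons_iff.mp hin with h1 | h1
        · cases hqe : q with
          | nil => exact hq hqe
          | cons qc q' =>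
            subst hqe
            obtain ⟨hqc, hq'⟩ := List.cons_prefix_cons.mp h1
            subst hqc
            have hq'ne : q' ≠ [] := by
              intro hx; simp [hx] at hq2
            have hq'all : q'.all pvIsPatChar = true := by
              simp at hqall; simpa using hqall.2
            have : q' <+: t :=
              pvPrefix_repl _ rc hq hrc t.length t le_rfl q' hq'ne hq'all hq'
            exact h (List.cons_prefix_cons.mpr ⟨rfl, this⟩)
        · exact ih t (by simp at hu; omega) h1

-- one iteration of A's while loop removes all occurrences: the loop equals one replace
theorem pvWhileLoop_eq_replace (p r : List Char)
    (hp2 : 2 ≤ p.length) (hpall : p.all pvIsPatChar = true)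
    (hr1 : r.length = 1) (hrall : r.all (fun ch => !pvIsPatChar ch) = true) :
    ∀ s, pvWhileLoop p r s = PySem.Chars.replace s p r := by
  intro s
  have hp : p ≠ [] := by cases p <;> simp_all
  obtain ⟨rc, rfl⟩ : ∃ rc, r = [rc] := List.length_eq_one_iff.mp hr1
  have hrc : pvIsPatChar rc = false := by simpa using hrall
  rw [pvWhileLoop]
  by_cases hin : PySem.Chars.isIn p s = true
  · rw [dif_pos ⟨hin, by simpa using hp2⟩]
    rw [pvWhileLoop]
    rw [dif_neg]
    intro hx
    exact pvNot_infix_repl p rc hp2 hpall hrc _ _ le_rfl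
      ((PySem.Chars.isIn_iff_infix _ _).mp hx.1)
  · rw [dif_neg (by simp [hin])]
    rw [pvRepl_not_infix p [rc] hp s]
    intro hx
    exact hin ((PySem.Chars.isIn_iff_infix _ _).mpr hx)

-- the fold of plain replaces over a table fragment
def pvF (l : List (List Char × List Char)) (s : List Char) : List Char :=
  l.foldl (fun m pr => PySem.Chars.replace m pr.1 pr.2) s

theorem pvF_nil (l : List (List Char × List Char)) (hl : ∀ pr ∈ l, pr ∈ pvEscA) :
    pvF l [] = [] := by
  induction l with
  | nil => rfl
  | cons q l' ih =>
    have hq := pvEscA_facts q (hl q (by simp))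
    have hqne : q.1 ≠ [] := by
      have := hq.1; intro hx; simp [hx] at this
    simp only [pvF, List.foldl_cons]
    rw [pvRepl_nil q.1 q.2 hqne]
    exact ih (fun pr hpr => hl pr (by simp [hpr]))

-- folding table entries none of which is p over p ++ x keeps the p-block intact
theorem pvFold_skip (p : List Char × List Char) (hp : p ∈ pvEscA) :
    ∀ (l : List (List Char × List Char)), (∀ q ∈ l, q ∈ pvEscA) → (∀ q ∈ l, q.1 ≠ p.1) →
      ∀ x, pvF l (p.1 ++ x) = p.1 ++ pvF l x := by
  intro l
  induction l with
  | nil => intro _ _ x; rfl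
  | cons q l' ih =>
    intro hl hne x
    have hqA : q ∈ pvEscA := hl q (by simp)
    have hqne : q.1 ≠ [] := by
      have := (pvEscA_facts q hqA).1; intro hx; simp [hx] at this
    simp only [pvF, List.foldl_cons]
    rw [pvRepl_skip q.1 q.2 hqne p.1 x
      (fun j hj => pvNoOccInside p q hp hqA x j hj (fun _ => hne q (by simp)))]
    exact ih (fun a ha => hl a (by simp [ha])) (fun a ha => hne a (by simp [ha])) _

-- folding the table past a character that no escape sequence starts with
theorem pvFold_head (c : Char) (hc : c ≠ '%') :
    ∀ (l : List (List Char × List Char)), (∀ q ∈ l, q ∈ pvEscA) →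
      ∀ y, pvF l (c :: y) = c :: pvF l y := by
  intro l
  induction l with
  | nil => intro _ y; rfl
  | cons q l' ih =>
    intro hl y
    have hqA : q ∈ pvEscA := hl q (by simp)
    have hqne : q.1 ≠ [] := by
      have := (pvEscA_facts q hqA).1; intro hx; simp [hx] at this
    have hnp : ¬ q.1 <+: (c :: y) := by
      intro hx
      cases hq1 : q.1 with
      | nil => exact hqne hq1
      | cons a b =>
        rw [hq1] at hx
        have ha : a = '%' := by
          have := pvEscA_head q hqA
          simp [hq1] at this
          exact this
        have := (List.cons_prefix_cons.mp hx).1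
        exact hc (by rw [← this, ha])
    simp only [pvF, List.foldl_cons]
    rw [pvRepl_cons_neg q.1 q.2 c y hqne hnp]
    exact ih (fun a ha => hl a (by simp [ha])) _

-- folding the table past a position where no escape sequence matches
theorem pvFold_nomatch :
    ∀ (l : List (List Char × List Char)), (∀ q ∈ l, q ∈ pvEscA) →
      ∀ (c : Char) (t : List Char), (∀ q ∈ pvEscA, ¬ q.1 <+: (c :: t)) →
      pvF l (c :: t) = c :: pvF l t := by
  intro l
  induction l with
  | nil => intro _ c t _; rfl
  | cons q l' ih =>
    intro hl c t hno
    have hqA : q ∈ pvEscA := hl q (by simp)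
    have hq := pvEscA_facts q hqA
    have hqne : q.1 ≠ [] := by
      have := hq.1; intro hx; simp [hx] at this
    obtain ⟨rc, hrc⟩ : ∃ rc, q.2 = [rc] := List.length_eq_one_iff.mp hq.2.2.1
    have hrcp : pvIsPatChar rc = false := by
      have := hq.2.2.2; simp [hrc] at this; simpa using this
    simp only [pvF, List.foldl_cons]
    rw [pvRepl_cons_neg q.1 q.2 c t hqne (hno q hqA)]
    apply ih (fun a ha => hl a (by simp [ha]))
    intro q' hq'A hx
    cases hq1 : q'.1 with
    | nil =>
      have := (pvEscA_facts q' hq'A).1; simp [hq1] at this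
    | cons a b =>
      rw [hq1] at hx
      obtain ⟨hac, hb⟩ := List.cons_prefix_cons.mp hx
      have hbne : b ≠ [] := by
        have := (pvEscA_facts q' hq'A).1
        intro hx2; simp [hq1, hx2] at this
      have hball : b.all pvIsPatChar = true := by
        have := (pvEscA_facts q' hq'A).2.1
        simp [hq1] at this; simpa using this.2
      have hb2 : b <+: t := by
        rw [hrc] at hb
        exact pvPrefix_repl q.1 rc hqne hrcp t.length t le_rfl b hbne hball hb
      exact hno q' hq'A (by rw [hq1, hac]; exact List.cons_prefix_cons.mpr ⟨rfl, hb2⟩)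

-- one-step equations for the scan
theorem pvDecode_some (c : Char) (t : List Char) (pr : List Char × List Char)
    (hfind : pvEscB.find? (fun pr => pr.1.isPrefixOf (c :: t)) = some pr) :
    pvDecode (c :: t) = pr.2 ++ pvDecode ((c :: t).drop pr.1.length) := by
  rw [pvDecode]
  split
  · rename_i pr1 h1
    rw [hfind] at h1
    cases h1
    rfl
  · rename_i h1
    rw [hfind] at h1
    cases h1

theorem pvDecode_none (c : Char) (t : List Char)
    (hfind : pvEscB.find? (fun pr => pr.1.isPrefixOf (c :: t)) = none) :
    pvDecode (c :: t) = c :: pvDecode t := by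
  rw [pvDecode]
  split
  · rename_i pr1 h1
    rw [hfind] at h1
    cases h1
  · rfl

-- main lemma: the thirteen replace passes equal the single forward scan
theorem pvMain : ∀ n (s : List Char), s.length ≤ n → pvF pvEscA s = pvDecode s := by
  intro n
  induction n with
  | zero =>
    intro s hs
    have : s = [] := by cases s <;> simp_all
    subst this
    rw [pvF_nil pvEscA (fun _ h => h), pvDecode]
  | succ n ih =>
    intro s hs
    cases s with
    | nil => rw [pvF_nil pvEscA (fun _ h => h), pvDecode]
    | cons c t =>
      cases hfind : pvEscB.find? (fun pr => pr.1.isPrefixOf (c :: t)) with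
      | none =>
        rw [pvDecode_none c t hfind]
        have hno : ∀ q ∈ pvEscA, ¬ q.1 <+: (c :: t) := by
          intro q hqA hx
          have hqB : q ∈ pvEscB := (pvPerm.mem_iff).mpr hqA
          have := List.find?_eq_none.mp hfind q hqB
          simp at this
          exact this hx
        rw [pvFold_nomatch pvEscA (fun _ h => h) c t hno]
        rw [ih t (by simp at hs; omega)]
      | some pr =>
        rw [pvDecode_some c t pr hfind]
        have hprB : pr ∈ pvEscB := List.mem_of_find?_eq_some hfind
        have hprA : pr ∈ pvEscA := (pvPerm.mem_iff).mp hprB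
        have hpre : pr.1 <+: (c :: t) := by
          have := List.find?_some hfind
          exact List.isPrefixOf_iff_prefix.mp (by simpa using this)
        obtain ⟨t', ht'⟩ := hpre
        have hdrop : (c :: t).drop pr.1.length = t' := by
          rw [← ht', List.drop_left]
        obtain ⟨L1, L2, hsplit⟩ := List.append_of_mem hprA
        have hfacts := pvEscA_facts pr hprA
        have hprne : pr.1 ≠ [] := by
          have := hfacts.1; intro hx; simp [hx] at this
        have hL1A : ∀ q ∈ L1, q ∈ pvEscA := by
          intro q hq; rw [hsplit]; simp [hq]
        have hL2A : ∀ q ∈ L2, q ∈ pvEscA := by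
          intro q hq; rw [hsplit]; simp [hq]
        have hL1ne : ∀ q ∈ L1, q.1 ≠ pr.1 := by
          intro q hq hx
          have hnd : (L1.map Prod.fst ++ (pr.1 :: L2.map Prod.fst)).Nodup := by
            have := pvNodupFst
            rw [hsplit] at this
            simpa using this
          exact List.disjoint_of_nodup_append hnd
            (List.mem_map.mpr ⟨q, hq, hx⟩) (by simp)
        obtain ⟨rc, hrc⟩ : ∃ rc, pr.2 = [rc] := List.length_eq_one_iff.mp hfacts.2.2.1
        have hrcp : pvIsPatChar rc = false := by
          have := hfacts.2.2.2; simp [hrc] at this; simpa using this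
        have hrcnp : rc ≠ '%' := by
          intro hx; rw [hx] at hrcp; simp [pvIsPatChar] at hrcp
        have hFsplit : ∀ y, pvF pvEscA y =
            pvF L2 (PySem.Chars.replace (pvF L1 y) pr.1 pr.2) := by
          intro y
          rw [hsplit]
          simp [pvF, List.foldl_append]
        have hlen : t'.length ≤ n := by
          have h2 : 2 ≤ pr.1.length := hfacts.1
          have hs2 : (pr.1 ++ t').length ≤ n + 1 := by rw [ht']; simpa using hs
          simp at hs2
          omega
        rw [← ht']
        rw [List.drop_left]
        rw [← ih t' hlen]
        rw [hFsplit (pr.1 ++ t'), hFsplit t']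
        rw [pvFold_skip pr hprA L1 hL1A hL1ne t']
        rw [pvRepl_cons_pos pr.1 pr.2 (pvF L1 t') hprne]
        rw [hrc]
        simp only [List.singleton_append]
        rw [pvFold_head rc hrcnp L2 hL2A]

theorem pvPortA_eq_F (s : List Char) :
    pvEscA.foldl (fun m c => pvWhileLoop c.1 c.2 m) s = pvF pvEscA s := by
  have : ∀ (l : List (List Char × List Char)), (∀ q ∈ l, q ∈ pvEscA) →
      ∀ s, l.foldl (fun m c => pvWhileLoop c.1 c.2 m) s = pvF l s := by
    intro l
    induction l with
    | nil => intro _ s; rfl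
    | cons q l' ih =>
      intro hl s
      have hq := pvEscA_facts q (hl q (by simp))
      simp only [List.foldl_cons, pvF]
      rw [pvWhileLoop_eq_replace q.1 q.2 hq.1 hq.2.1 hq.2.2.1 hq.2.2.2 s]
      exact ih (fun a ha => hl a (by simp [ha])) _
  exact this pvEscA (fun _ h => h) s

-- ===== VERDICT (by name: the statement is the Claim_ definition above) =====
theorem cleanup_string_spec : Claim_equal_cleanup_string := by
  intro msg _
  unfold Spec_cleanup_string cleanup_string cleanup_string_alt
  rw [pvPortA_eq_F, pvMain msg.toList.length msg.toList le_rfl]
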